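-- pv_equiv track=rewrite | github.com/yudong-94/Fundamentals-of-Computing-in-Python | Algorithmic thinking/assignment/module1/degree_distribution.py | in_degree_distribution
-- ===== SOURCE A (Python) =====
-- def compute_in_degrees(digraph):
--     '''
--     for a given directed graph,
--     compute in_degrees for each nodes,
--     and return as a dictionary.
--     '''
--     degrees = {}
--     for node in digraph:
--         counter = 0
--         for node_2 in digraph:
--             if node in digraph[node_2]:
--                 counter += 1
--         degrees[node] = counter
--     return degrees
--
-- def in_degree_distribution(digraph):
--     '''
--     for a given directed graph,
--     compute number of nodes for each valid in-degree value.
--     '''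
--     distribution = {}
--     degrees = compute_in_degrees(digraph)
--     in_degrees = degrees.values()
--     for degree in in_degrees:
--         counter = 0
--         for node in degrees:
--             if degrees[node] == degree:
--                 counter += 1
--         distribution[degree] = counter
--     return distribution
-- ===== SOURCE B (Python) =====
-- def in_degree_distribution(digraph):
--     '''
--     for a given directed graph,
--     compute number of nodes for each valid in-degree value.
--     One pass over the adjacency lists to count in-degrees, one pass to tally.
--     '''
--     indeg = dict.fromkeys(digraph, 0)
--     for targets in digraph.values():
--         for node in set(targets):
--             if node in indeg:
--                 indeg[node] += 1
--     distribution = {}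
--     for degree in indeg.values():
--         distribution[degree] = distribution.get(degree, 0) + 1
--     return distribution
-- ===== Notes on version B (the rewrite author's own statement) =====
-- stated objective: faster
-- what changed: Replaces A's quadratic per-node membership scan and quadratic per-degree recount with a single pass over the adjacency lists accumulating in-degree counts in a dict, followed by one counting pass over the values for the distribution.
import Mathlib
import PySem

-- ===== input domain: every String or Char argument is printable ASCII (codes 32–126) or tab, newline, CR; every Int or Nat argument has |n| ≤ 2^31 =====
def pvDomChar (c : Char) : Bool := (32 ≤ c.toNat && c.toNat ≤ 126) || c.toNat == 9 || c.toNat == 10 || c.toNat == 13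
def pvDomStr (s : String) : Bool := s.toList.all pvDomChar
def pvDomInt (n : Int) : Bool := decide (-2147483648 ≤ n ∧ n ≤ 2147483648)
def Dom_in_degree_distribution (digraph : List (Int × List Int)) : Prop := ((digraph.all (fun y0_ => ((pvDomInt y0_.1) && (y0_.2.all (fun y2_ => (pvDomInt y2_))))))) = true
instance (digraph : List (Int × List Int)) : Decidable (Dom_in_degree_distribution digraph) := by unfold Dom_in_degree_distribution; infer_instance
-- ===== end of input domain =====

-- B replaces A's O(V^2)+O(V^2) nested membership/recount scans with one pass over the
-- adjacency lists to accumulate in-degrees and one counting pass for the distribution.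

-- ===== PORT A =====
-- helper compute_in_degrees, transliterated (dict parameter = PySem.Dict)
def compute_in_degrees (digraph : PySem.Dict Int (List Int)) : PySem.Dict Int Int :=
  digraph.keys.foldl (fun degrees node =>
    degrees.insert node
      (digraph.keys.foldl (fun counter node_2 =>
        if (digraph.getD node_2 []).contains node then counter + 1 else counter) 0))
    PySem.Dict.empty

def in_degree_distribution (digraph : List (Int × List Int)) : List (Int × Int) :=
  let dg := PySem.Dict.ofList digraph
  let degrees := compute_in_degrees dg
  (degrees.values.foldl (fun distribution degree =>
    distribution.insert degree
      (degrees.keys.foldl (fun counter node =>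
        if degrees.getD node 0 == degree then counter + 1 else counter) 0))
    PySem.Dict.empty).items

-- ===== PORT B =====
def in_degree_distribution_alt (digraph : List (Int × List Int)) : List (Int × Int) :=
  let dg := PySem.Dict.ofList digraph
  let indeg := dg.values.foldl (fun indeg targets =>
      (PySem.Set.ofList targets).foldl (fun m node =>
        if m.contains node then m.modify node 0 (· + 1) else m) indeg)
    (PySem.Dict.ofList (dg.keys.map (fun k => (k, (0 : Int)))))
  (indeg.values.foldl (fun distribution degree =>
      distribution.insert degree (distribution.getD degree 0 + 1))
    PySem.Dict.empty).items

-- ===== PRECONDITION & SPEC =====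
def Spec_in_degree_distribution (digraph : List (Int × List Int)) (out : List (Int × Int)) : Prop := out = in_degree_distribution_alt digraph
instance (digraph : List (Int × List Int)) (out : List (Int × Int)) : Decidable (Spec_in_degree_distribution digraph out) := by unfold Spec_in_degree_distribution; infer_instance

-- ===== CLAIM (what is proved, stated in full; the proofs are below) =====
def Claim_equal_in_degree_distribution : Prop := ∀ (digraph : List (Int × List Int)), Dom_in_degree_distribution digraph → Spec_in_degree_distribution digraph (in_degree_distribution digraph)

-- ===== LEMMAS AND PROOFS =====

-- a conditional-increment fold counts
theorem pv_foldl_if_count (f : Int → Bool) : ∀ (ks : List Int) (c : Int),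
    ks.foldl (fun c k => if f k then c + 1 else c) c = c + (ks.countP f : Int) := by
  intro ks
  induction ks with
  | nil => intro c; simp
  | cons k rest ih =>
    intro c
    rw [List.foldl_cons, ih, List.countP_cons]
    by_cases h : f k
    · simp [h]; ring
    · simp [h]

-- lookup of a member pair in a nodup-keys dict
theorem pv_find_nodup {ν : Type} : ∀ (l : List (Int × ν)) (k : Int) (v : ν),
    (l.map Prod.fst).Nodup → (k, v) ∈ l → l.find? (fun p => p.1 == k) = some (k, v) := by
  intro l
  induction l with
  | nil => simp
  | cons p rest ih =>
    intro k v hnd hm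
    simp only [List.map_cons, List.nodup_cons] at hnd
    rcases List.mem_cons.mp hm with h | h
    · rw [← h]; simp
    · have hk : k ∈ rest.map Prod.fst := List.mem_map_of_mem h
      have hne : (p.1 == k) = false := by
        simp only [beq_eq_false_iff_ne, ne_eq]
        intro e; exact hnd.1 (e ▸ hk)
      simp only [List.find?_cons, hne]
      exact ih k v hnd.2 h

theorem pv_getD_of_mem_items {ν : Type} (d : PySem.Dict Int ν) (k : Int) (v dflt : ν)
    (hnd : d.keys.Nodup) (hm : (k, v) ∈ d.items) : d.getD k dflt = v := by
  have hnd' : (d.items.map Prod.fst).Nodup := hnd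
  rw [PySem.Dict.getD, PySem.Dict.get?, pv_find_nodup d.items k v hnd' hm]
  rfl

-- inserting fresh keys appends
theorem pv_foldl_insert_pairs : ∀ (ps : List (Int × Int)) (d : PySem.Dict Int Int),
    (d.keys ++ ps.map Prod.fst).Nodup →
    (ps.foldl (fun d p => d.insert p.1 p.2) d).items = d.items ++ ps := by
  intro ps
  induction ps with
  | nil => intro d _; simp
  | cons p rest ih =>
    intro d h
    have hdisj := List.disjoint_of_nodup_append (l₁ := d.keys) (l₂ := (p :: rest).map Prod.fst) h
    have hk : p.1 ∉ d.keys := fun hmem => hdisj hmem (by simp)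
    have hc : d.contains p.1 = false := by
      rw [PySem.Dict.contains_eq_decide_mem_keys]; simpa using hk
    have hins : (d.insert p.1 p.2).items = d.items ++ [p] := by
      simp [PySem.Dict.insert, hc]
    have hkeys : (d.insert p.1 p.2).keys = d.keys ++ [p.1] := by
      simp [PySem.Dict.keys, hins]
    rw [List.foldl_cons, ih (d.insert p.1 p.2) (by
      rw [hkeys]
      simpa [List.append_assoc] using h), hins]
    simp

theorem pv_foldl_insert_fresh (F : Int → Int) : ∀ (ks : List Int) (d : PySem.Dict Int Int),
    (d.keys ++ ks).Nodup →
    (ks.foldl (fun d k => d.insert k (F k)) d).items = d.items ++ ks.map (fun k => (k, F k)) := by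
  intro ks d h
  have := pv_foldl_insert_pairs (ks.map (fun k => (k, F k))) d (by
    simpa [List.map_map, Function.comp_def] using h)
  simpa [List.foldl_map] using this

-- dict.fromkeys on nodup keys
theorem pv_items_fromkeys (K : List Int) (hnd : K.Nodup) :
    (PySem.Dict.ofList (K.map (fun k => (k, (0 : Int))))).items = K.map (fun k => (k, (0 : Int))) := by
  have := pv_foldl_insert_pairs (K.map (fun k => (k, (0 : Int)))) PySem.Dict.empty (by
    simpa [List.map_map, Function.comp_def, PySem.Dict.empty] using hnd)
  simpa [PySem.Dict.ofList, PySem.Dict.update, PySem.Dict.empty] using this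

theorem pv_getD_fromkeys (K : List Int) (k : Int) :
    (PySem.Dict.mk (K.map (fun k => (k, (0 : Int))))).getD k 0 = 0 := by
  induction K with
  | nil => simp [PySem.Dict.getD, PySem.Dict.get?]
  | cons a K ih =>
    by_cases h : a = k
    · simp [PySem.Dict.getD, PySem.Dict.get?, h]
    · simpa [PySem.Dict.getD, PySem.Dict.get?, h] using ih

-- a nodup-keys dict is determined by keys and getD
theorem pv_items_eq_keys_map_getD (d : PySem.Dict Int Int) (hnd : d.keys.Nodup) :
    d.items = d.keys.map (fun k => (k, d.getD k 0)) := by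
  obtain ⟨l⟩ := d
  induction l with
  | nil => simp [PySem.Dict.keys]
  | cons p rest ih =>
    have hnd' : (PySem.Dict.mk (κ := Int) (ν := Int) rest).keys.Nodup := by
      simpa [PySem.Dict.keys] using hnd.of_cons
    have hhead : (PySem.Dict.mk (p :: rest)).getD p.1 0 = p.2 := by
      simp [PySem.Dict.getD, PySem.Dict.get?]
    have htail : ∀ k ∈ rest.map (fun x : Int × Int => x.1),
        (PySem.Dict.mk (p :: rest)).getD k 0 = (PySem.Dict.mk rest).getD k 0 := by
      intro k hk
      have hne : (p.1 == k) = false := by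
        simp only [beq_eq_false_iff_ne, ne_eq]
        intro e
        have hnd2 : (p.1 :: rest.map (fun x : Int × Int => x.1)).Nodup := hnd
        exact (List.nodup_cons.mp hnd2).1 (e ▸ hk)
      simp [PySem.Dict.getD, PySem.Dict.get?, hne]
    calc (PySem.Dict.mk (p :: rest)).items
        = p :: rest := rfl
      _ = (p.1, (PySem.Dict.mk (p :: rest)).getD p.1 0)
            :: (rest.map Prod.fst).map (fun k => (k, (PySem.Dict.mk rest).getD k 0)) := by
          rw [hhead]
          have := ih hnd'
          simp only [PySem.Dict.keys] at this ⊢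
          simpa using congrArg (p :: ·) this
      _ = (PySem.Dict.mk (p :: rest)).keys.map (fun k => (k, (PySem.Dict.mk (p :: rest)).getD k 0)) := by
          simp only [PySem.Dict.keys, List.map_cons]
          refine congrArg _ ?_
          exact (List.map_congr_left fun k hk => by rw [htail k hk]).symm

-- B's guarded increment step
theorem pv_step_keys (m : PySem.Dict Int Int) (t : Int) :
    ((if m.contains t then m.modify t 0 (· + 1) else m)).keys = m.keys := by
  by_cases h : m.contains t
  · simp [h, PySem.Dict.keys_modify, PySem.Dict.keys_insert_of_contains _ _ h]
  · simp [h]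

theorem pv_inner_keys : ∀ (ts : List Int) (m : PySem.Dict Int Int),
    (ts.foldl (fun m t => if m.contains t then m.modify t 0 (· + 1) else m) m).keys = m.keys := by
  intro ts
  induction ts with
  | nil => intro m; rfl
  | cons t ts ih =>
    intro m
    rw [List.foldl_cons, ih, pv_step_keys]

theorem pv_inner_getD : ∀ (ts : List Int) (m : PySem.Dict Int Int) (v : Int),
    (ts.foldl (fun m t => if m.contains t then m.modify t 0 (· + 1) else m) m).getD v 0
      = m.getD v 0 + (if m.contains v then (ts.count v : Int) else 0) := by
  intro ts
  induction ts with
  | nil => intro m v; simp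
  | cons t ts ih =>
    intro m v
    rw [List.foldl_cons, ih]
    have hcon : (if m.contains t then m.modify t 0 (· + 1) else m).contains v = m.contains v := by
      by_cases h : m.contains t
      · by_cases hv : v = t
        · subst hv; simp [h, PySem.Dict.contains_modify]
        · simp [h, PySem.Dict.contains_modify, hv]
      · simp [h]
    rw [hcon]
    by_cases h : m.contains t
    · rw [if_pos h]
      by_cases hv : v = t
      · subst hv
        rw [PySem.Dict.getD_modify_self]
        simp [h]
        ring
      · rw [PySem.Dict.getD_modify_of_ne (hne := by simpa using hv)]
        have : (t :: ts).count v = ts.count v := by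
          simp [Ne.symm hv]
        rw [this]
    · rw [if_neg h]
      by_cases hc : m.contains v
      · have hv : v ≠ t := fun e => h (e ▸ hc)
        have : (t :: ts).count v = ts.count v := by
          simp [Ne.symm hv]
        rw [this]
      · simp [hc]

theorem pv_outer_keys : ∀ (vss : List (List Int)) (m : PySem.Dict Int Int),
    (vss.foldl (fun m ts => (PySem.Set.ofList ts).foldl
        (fun m t => if m.contains t then m.modify t 0 (· + 1) else m) m) m).keys = m.keys := by
  intro vss
  induction vss with
  | nil => intro m; rfl
  | cons ts vss ih =>
    intro m
    rw [List.foldl_cons, ih, pv_inner_keys]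

theorem pv_outer_getD : ∀ (vss : List (List Int)) (m : PySem.Dict Int Int) (v : Int),
    (vss.foldl (fun m ts => (PySem.Set.ofList ts).foldl
        (fun m t => if m.contains t then m.modify t 0 (· + 1) else m) m) m).getD v 0
      = m.getD v 0 + (if m.contains v then (vss.countP (fun ts => ts.contains v) : Int) else 0) := by
  intro vss
  induction vss with
  | nil => intro m v; simp
  | cons ts vss ih =>
    intro m v
    rw [List.foldl_cons, ih]
    have hcon : ((PySem.Set.ofList ts).foldl
        (fun m t => if m.contains t then m.modify t 0 (· + 1) else m) m).contains v = m.contains v := by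
      rw [PySem.Dict.contains_eq_decide_mem_keys, PySem.Dict.contains_eq_decide_mem_keys, pv_inner_keys]
    rw [hcon, pv_inner_getD]
    have hcount : ((PySem.Set.ofList ts).count v : Int) = if ts.contains v then 1 else 0 := by
      by_cases h : v ∈ ts
      · rw [List.count_eq_one_of_mem (PySem.Set.nodup_ofList ts) ((PySem.Set.mem_ofList ts v).mpr h)]
        simp [h]
      · rw [List.count_eq_zero_of_not_mem (fun hc => h ((PySem.Set.mem_ofList ts v).mp hc))]
        simp [h]
    rw [List.countP_cons]
    by_cases hc : m.contains v
    · simp only [hc, if_pos]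
      rw [hcount]
      by_cases ht : ts.contains v
      · rw [if_pos ht, if_pos ht]
        push_cast
        ring
      · rw [if_neg ht, if_neg ht]
        push_cast
        ring
    · simp [hc]

-- inserting a value depending only on the key overwrites with the same value
theorem pv_foldl_insert_const (F : Int → Int) (vs : List Int) :
    (vs.foldl (fun d v => d.insert v (F v)) PySem.Dict.empty).items
      = (PySem.Set.ofList vs).map (fun v => (v, F v)) := by
  induction vs using List.reverseRecOn with
  | nil => rfl
  | append_singleton vs v ih =>
    rw [List.foldl_append, List.foldl_cons, List.foldl_nil, PySem.Set.ofList_append_singleton]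
    have hkeys : (vs.foldl (fun d v => d.insert v (F v)) PySem.Dict.empty).keys
        = PySem.Set.ofList vs := by
      rw [PySem.Dict.keys_foldl_insert]
      rfl
    by_cases h : (vs.foldl (fun d v => d.insert v (F v)) PySem.Dict.empty).contains v
    · have hv : v ∈ PySem.Set.ofList vs := by
        rw [PySem.Dict.contains_eq_decide_mem_keys, hkeys] at h
        simpa using h
      have hadd : (PySem.Set.ofList vs).add v = PySem.Set.ofList vs := by
        simp [PySem.Set.add, PySem.Set.contains]
        exact (PySem.Set.mem_ofList vs v).mp hv
      rw [hadd]
      have hins : ((vs.foldl (fun d v => d.insert v (F v)) PySem.Dict.empty).insert v (F v)).items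
          = ((vs.foldl (fun d v => d.insert v (F v)) PySem.Dict.empty).items).map
              (fun p => if p.1 == v then (v, F v) else p) := by
        conv_lhs => rw [PySem.Dict.insert]
        rw [if_pos h]
      rw [hins, ih, List.map_map]
      refine List.map_congr_left fun k _ => ?_
      by_cases hk : k = v
      · subst hk; simp
      · simp [Function.comp, hk]
    · have hv : v ∉ PySem.Set.ofList vs := by
        rw [PySem.Dict.contains_eq_decide_mem_keys, hkeys] at h
        simpa using h
      have hadd : (PySem.Set.ofList vs).add v = PySem.Set.ofList vs ++ [v] := by
        have : PySem.Set.contains (PySem.Set.ofList vs) v = false := by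
          simp [PySem.Set.contains]
          exact fun hm => hv ((PySem.Set.mem_ofList vs v).mpr hm)
        rw [PySem.Set.add, this]
        simp
      rw [hadd]
      have hins : ((vs.foldl (fun d v => d.insert v (F v)) PySem.Dict.empty).insert v (F v)).items
          = ((vs.foldl (fun d v => d.insert v (F v)) PySem.Dict.empty).items) ++ [(v, F v)] := by
        conv_lhs => rw [PySem.Dict.insert]
        rw [if_neg h]
      rw [hins, ih]
      simp

-- the common normal form of both ports' in-degree dicts
theorem pv_degrees_items (dg : PySem.Dict Int (List Int)) (hnd : dg.keys.Nodup) :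
    (compute_in_degrees dg).items
      = dg.keys.map (fun k => (k, (dg.items.countP (fun p => p.2.contains k) : Int))) := by
  have hfun : (fun (degrees : PySem.Dict Int Int) node => degrees.insert node
        (dg.keys.foldl (fun counter node_2 =>
          if (dg.getD node_2 []).contains node then counter + 1 else counter) 0))
      = fun (degrees : PySem.Dict Int Int) node => degrees.insert node
          ((dg.keys.countP (fun node_2 => (dg.getD node_2 []).contains node) : Int)) := by
    funext d k
    rw [pv_foldl_if_count (fun node_2 => (dg.getD node_2 []).contains k) dg.keys 0]
    simp
  rw [compute_in_degrees, hfun,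
    pv_foldl_insert_fresh _ dg.keys PySem.Dict.empty (by simpa [PySem.Dict.empty, PySem.Dict.keys] using hnd)]
  simp only [PySem.Dict.empty, List.nil_append]
  refine List.map_congr_left fun k _ => ?_
  congr 1
  have hmap : dg.keys.countP (fun node_2 => (dg.getD node_2 []).contains k)
      = dg.items.countP (fun p => (dg.getD p.1 []).contains k) := by
    rw [PySem.Dict.keys, List.countP_map]
    rfl
  rw [hmap]
  congr 1
  refine List.countP_congr fun p hp => ?_
  rw [pv_getD_of_mem_items dg p.1 p.2 [] hnd hp]

theorem pv_indeg_items (dg : PySem.Dict Int (List Int)) (hnd : dg.keys.Nodup) :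
    (dg.values.foldl (fun indeg targets =>
        (PySem.Set.ofList targets).foldl (fun m node =>
          if m.contains node then m.modify node 0 (· + 1) else m) indeg)
      (PySem.Dict.ofList (dg.keys.map (fun k => (k, (0 : Int)))))).items
      = dg.keys.map (fun k => (k, (dg.items.countP (fun p => p.2.contains k) : Int))) := by
  have hitems0 : (PySem.Dict.ofList (dg.keys.map (fun k => (k, (0 : Int))))).items
      = dg.keys.map (fun k => (k, (0 : Int))) := pv_items_fromkeys dg.keys hnd
  have heq0 : PySem.Dict.ofList (dg.keys.map (fun k => (k, (0 : Int))))
      = PySem.Dict.mk (dg.keys.map (fun k => (k, (0 : Int)))) := PySem.Dict.ext hitems0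
  have hkeys0 : (PySem.Dict.ofList (dg.keys.map (fun k => (k, (0 : Int))))).keys = dg.keys := by
    rw [heq0]
    simp [PySem.Dict.keys, List.map_map]
  have hkeys : (dg.values.foldl (fun indeg targets =>
        (PySem.Set.ofList targets).foldl (fun m node =>
          if m.contains node then m.modify node 0 (· + 1) else m) indeg)
      (PySem.Dict.ofList (dg.keys.map (fun k => (k, (0 : Int)))))).keys = dg.keys := by
    rw [pv_outer_keys, hkeys0]
  rw [pv_items_eq_keys_map_getD _ (by rw [hkeys]; exact hnd), hkeys]
  refine List.map_congr_left fun k hk => ?_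
  congr 1
  rw [pv_outer_getD]
  have hget0 : (PySem.Dict.ofList (dg.keys.map (fun k => (k, (0 : Int))))).getD k 0 = 0 := by
    rw [heq0, pv_getD_fromkeys]
  have hcont0 : (PySem.Dict.ofList (dg.keys.map (fun k => (k, (0 : Int))))).contains k = true := by
    rw [PySem.Dict.contains_eq_decide_mem_keys, hkeys0]
    simpa using hk
  rw [hget0, hcont0, if_pos rfl]
  rw [PySem.Dict.values, List.countP_map, zero_add]
  rfl

theorem pv_main (dg : PySem.Dict Int (List Int)) (hnd : dg.keys.Nodup) :
    ((compute_in_degrees dg).values.foldl (fun distribution degree =>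
      distribution.insert degree
        ((compute_in_degrees dg).keys.foldl (fun counter node =>
          if (compute_in_degrees dg).getD node 0 == degree then counter + 1 else counter) (0 : Int)))
      PySem.Dict.empty).items
    = ((((dg.values.foldl (fun indeg targets =>
          (PySem.Set.ofList targets).foldl (fun m node =>
            if m.contains node then m.modify node 0 (· + 1) else m) indeg)
        (PySem.Dict.ofList (dg.keys.map (fun k => (k, (0 : Int))))))).values).foldl
        (fun distribution degree =>
          distribution.insert degree (distribution.getD degree (0 : Int) + 1))
        PySem.Dict.empty).items := by
  have hdeg := pv_degrees_items dg hnd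
  have hind := pv_indeg_items dg hnd
  have hkeysA : (compute_in_degrees dg).keys = dg.keys := by
    rw [PySem.Dict.keys, hdeg, List.map_map]
    simp [Function.comp_def]
  have hndA : (compute_in_degrees dg).keys.Nodup := by rw [hkeysA]; exact hnd
  have hvA : (compute_in_degrees dg).values
      = dg.keys.map (fun k => (dg.items.countP (fun p => p.2.contains k) : Int)) := by
    rw [PySem.Dict.values, hdeg, List.map_map]
    rfl
  have hvB : ((dg.values.foldl (fun indeg targets =>
          (PySem.Set.ofList targets).foldl (fun m node =>
            if m.contains node then m.modify node 0 (· + 1) else m) indeg)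
        (PySem.Dict.ofList (dg.keys.map (fun k => (k, (0 : Int))))))).values
      = dg.keys.map (fun k => (dg.items.countP (fun p => p.2.contains k) : Int)) := by
    rw [PySem.Dict.values, hind, List.map_map]
    rfl
  have hgetA : ∀ k ∈ dg.keys, (compute_in_degrees dg).getD k 0
      = (dg.items.countP (fun p => p.2.contains k) : Int) := by
    intro k hk
    refine pv_getD_of_mem_items _ k _ 0 hndA ?_
    rw [hdeg]
    exact List.mem_map_of_mem hk
  -- the distribution value A recounts each round is the total count in the values list
  have hfunA : (fun (distribution : PySem.Dict Int Int) degree =>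
        distribution.insert degree
          ((compute_in_degrees dg).keys.foldl (fun counter node =>
            if (compute_in_degrees dg).getD node 0 == degree then counter + 1 else counter) (0 : Int)))
      = fun (distribution : PySem.Dict Int Int) degree =>
          distribution.insert degree
            (((compute_in_degrees dg).values.count degree : Int)) := by
    funext dist deg
    rw [pv_foldl_if_count (fun node => (compute_in_degrees dg).getD node 0 == deg)
      (compute_in_degrees dg).keys 0]
    congr 1
    rw [zero_add, hkeysA, hvA, List.count_eq_countP, List.countP_map]
    refine congrArg Nat.cast (List.countP_congr fun k hk => ?_)
    simp only [Function.comp_apply, beq_iff_eq]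
    rw [hgetA k hk]
  rw [hfunA]
  rw [pv_foldl_insert_const, PySem.Dict.foldl_insert_getD_add_one_eq_counter,
    PySem.Dict.items_counter, hvA, hvB]

-- ===== VERDICT (by name: the statement is the Claim_ definition above) =====
theorem in_degree_distribution_spec : Claim_equal_in_degree_distribution := by
  intro digraph _
  unfold Spec_in_degree_distribution in_degree_distribution in_degree_distribution_alt
  exact pv_main (PySem.Dict.ofList digraph) (PySem.Dict.nodup_keys_ofList digraph)
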